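-- pv_equiv track=rewrite | github.com/fnannizzi/advent-of-code | 2024/day4/day4.py | search_horizontal
-- ===== SOURCE A (Python) =====
-- search_length_xmas = 4
--
-- XMAS = ['X', 'M', 'A', 'S']
--
-- def search_horizontal(wordsearch, x_col_i, x_row_i):
--   assert wordsearch[x_col_i][x_row_i] == 'X'
--   backwards_xmas = True
--   forwards_xmas = True
--   for i in range(1, search_length_xmas):
--     if (x_row_i - i < 0) or (backwards_xmas and wordsearch[x_col_i][x_row_i - i] != XMAS[i]):
--       backwards_xmas = False
--     if (x_row_i + i >= len(wordsearch[x_col_i])) or (forwards_xmas and wordsearch[x_col_i][x_row_i + i] != XMAS[i]):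
--       forwards_xmas = False
--
--     if not backwards_xmas and not forwards_xmas:
--       return 0
--
--   return sum([backwards_xmas, forwards_xmas])
-- ===== SOURCE B (Python) =====
-- XMAS = ['X', 'M', 'A', 'S']
--
-- def search_horizontal(wordsearch, x_col_i, x_row_i):
--   assert wordsearch[x_col_i][x_row_i] == 'X'
--   row = wordsearch[x_col_i]
--   forwards = row[x_row_i + 1:][:3] == ['M', 'A', 'S']
--   backwards = x_row_i >= 3 and row[x_row_i - 3:x_row_i] == ['S', 'A', 'M']
--   return int(backwards) + int(forwards)
-- ===== Notes on version B (the rewrite author's own statement) =====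
-- stated objective: simpler
-- what changed: Replaces the incremental flag-carrying loop over offsets 1..3 (with early exit) by two direct slice comparisons: the three cells after the X against ['M','A','S'] and, when x_row_i >= 3, the three cells before it against ['S','A','M'].
-- intended difference: For x_row_i = -2 or -3 (a negative row index, valid only by Python wraparound) when the cells wrapping past the end of the row spell M,A,S, A's per-index bound check misses the wrap and it counts a forward XMAS crossing the row boundary, returning 1; B returns 0, the intended value, since no horizontal XMAS fits there. — e.g. on search_horizontal([["A", "S", "X", "M"]], 0, -2): A returns 1, B returns 0
import Mathlib
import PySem

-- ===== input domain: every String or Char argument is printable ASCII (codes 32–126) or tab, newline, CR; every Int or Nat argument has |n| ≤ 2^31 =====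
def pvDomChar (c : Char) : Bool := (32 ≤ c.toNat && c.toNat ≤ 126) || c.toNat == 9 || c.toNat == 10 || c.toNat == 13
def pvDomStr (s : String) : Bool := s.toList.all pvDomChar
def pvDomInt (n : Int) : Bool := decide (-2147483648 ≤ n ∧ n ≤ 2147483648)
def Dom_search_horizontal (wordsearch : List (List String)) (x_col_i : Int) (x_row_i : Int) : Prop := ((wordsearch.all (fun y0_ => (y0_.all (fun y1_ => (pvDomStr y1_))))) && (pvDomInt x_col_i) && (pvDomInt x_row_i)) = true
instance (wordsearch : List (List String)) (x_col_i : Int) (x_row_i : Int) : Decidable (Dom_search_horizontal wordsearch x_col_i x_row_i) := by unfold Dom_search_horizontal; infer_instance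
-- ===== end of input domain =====

-- B replaces A's incremental flag loop by two direct three-cell slice comparisons (objective: simpler).

-- ===== PORT A =====
def pvXMAS : List String := ["X", "M", "A", "S"]

-- the for-loop of A over range(1, search_length_xmas) with its two flags and the early 'return 0'
def pvShLoop (row : List String) (x : Int) : List Int → Bool → Bool → Int
  | [], b, f => (if b then (1:Int) else 0) + (if f then 1 else 0)
  | i :: rest, b, f =>
    let b' : Bool := if x - i < 0 ∨ (b = true ∧ PySem.List.pyGet? row (x - i) ≠ PySem.List.pyGet? pvXMAS i) then false else b
    let f' : Bool := if x + i ≥ (row.length : Int) ∨ (f = true ∧ PySem.List.pyGet? row (x + i) ≠ PySem.List.pyGet? pvXMAS i) then false else f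
    if b' = false ∧ f' = false then 0 else pvShLoop row x rest b' f'

def search_horizontal (wordsearch : List (List String)) (x_col_i : Int) (x_row_i : Int) : Int :=
  match PySem.List.pyGet? wordsearch x_col_i with
  | none => 0  -- IndexError on the row lookup: outside Pre_
  | some row =>
    if PySem.List.pyGet? row x_row_i = some "X" then
      pvShLoop row x_row_i (PySem.List.pyRange 1 4 1) true true
    else 0  -- assert failure (or IndexError on the cell): outside Pre_

-- ===== PORT B =====
def search_horizontal_alt (wordsearch : List (List String)) (x_col_i : Int) (x_row_i : Int) : Int :=
  match PySem.List.pyGet? wordsearch x_col_i with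
  | none => 0  -- IndexError on the row lookup: outside Pre_
  | some row =>
    if PySem.List.pyGet? row x_row_i = some "X" then
      -- forwards = row[x_row_i + 1:][:3] == ['M', 'A', 'S']
      let forwards : Prop :=
        PySem.List.slice (PySem.List.slice row (some (x_row_i + 1)) none) none (some 3) = ["M", "A", "S"]
      -- backwards = x_row_i >= 3 and row[x_row_i - 3:x_row_i] == ['S', 'A', 'M']
      let backwards : Prop :=
        3 ≤ x_row_i ∧ PySem.List.slice row (some (x_row_i - 3)) (some x_row_i) = ["S", "A", "M"]
      (if backwards then 1 else 0) + (if forwards then 1 else 0)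
    else 0  -- assert failure (or IndexError on the cell): outside Pre_

-- ===== PRECONDITION & SPEC =====
-- the cell wordsearch[x_col_i][x_row_i] under Python indexing (wraparound included)
def pvCell (wordsearch : List (List String)) (c j : Int) : Option String :=
  (PySem.List.pyGet? wordsearch c).bind (fun row => PySem.List.pyGet? row j)

-- Pre_: exactly where A returns normally — both index lookups succeed and the assert's cell is 'X'
def Pre_search_horizontal (wordsearch : List (List String)) (x_col_i : Int) (x_row_i : Int) : Prop :=
  pvCell wordsearch x_col_i x_row_i = some "X"
instance (wordsearch : List (List String)) (x_col_i : Int) (x_row_i : Int) : Decidable (Pre_search_horizontal wordsearch x_col_i x_row_i) := by unfold Pre_search_horizontal; infer_instance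

def pvWitness_search_horizontal : List (List String) × Int × Int := ([["X", "M", "A", "S"]], 0, 0)

-- For x_row_i = -2 or -3 (valid only by Python wraparound) when the cells wrapping past the end of
-- the row spell M,A,S, A's bound check misses the wrap and counts a forward XMAS crossing the row
-- boundary (returns 1); B returns the intended 0: no horizontal XMAS fits there.
def D_search_horizontal (wordsearch : List (List String)) (x_col_i : Int) (x_row_i : Int) : Prop :=
  (x_row_i = -2 ∨ x_row_i = -3) ∧
  [x_row_i + 1, x_row_i + 2, x_row_i + 3].map (pvCell wordsearch x_col_i) = [some "M", some "A", some "S"]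
instance (wordsearch : List (List String)) (x_col_i : Int) (x_row_i : Int) : Decidable (D_search_horizontal wordsearch x_col_i x_row_i) := by unfold D_search_horizontal; infer_instance

def Spec_search_horizontal (wordsearch : List (List String)) (x_col_i : Int) (x_row_i : Int) (out : Int) : Prop := ¬ D_search_horizontal wordsearch x_col_i x_row_i → out = search_horizontal_alt wordsearch x_col_i x_row_i
instance (wordsearch : List (List String)) (x_col_i : Int) (x_row_i : Int) (out : Int) : Decidable (Spec_search_horizontal wordsearch x_col_i x_row_i out) := by unfold Spec_search_horizontal; infer_instance

def pvDiffWitness_search_horizontal : List (List String) × Int × Int := ([["A", "S", "X", "M"]], 0, -2)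
def pvDiffWitnessOut_search_horizontal : Int × Int := (1, 0)

-- ===== CLAIM (what is proved, stated in full; the proofs are below) =====
def Claim_unchanged_search_horizontal : Prop := ∀ (wordsearch : List (List String)) (x_col_i : Int) (x_row_i : Int), Dom_search_horizontal wordsearch x_col_i x_row_i → Pre_search_horizontal wordsearch x_col_i x_row_i → Spec_search_horizontal wordsearch x_col_i x_row_i (search_horizontal wordsearch x_col_i x_row_i)
def Claim_changed_search_horizontal : Prop := Dom_search_horizontal (pvDiffWitness_search_horizontal.1) (pvDiffWitness_search_horizontal.2.1) (pvDiffWitness_search_horizontal.2.2) ∧ Pre_search_horizontal (pvDiffWitness_search_horizontal.1) (pvDiffWitness_search_horizontal.2.1) (pvDiffWitness_search_horizontal.2.2) ∧ D_search_horizontal (pvDiffWitness_search_horizontal.1) (pvDiffWitness_search_horizontal.2.1) (pvDiffWitness_search_horizontal.2.2) ∧ search_horizontal (pvDiffWitness_search_horizontal.1) (pvDiffWitness_search_horizontal.2.1) (pvDiffWitness_search_horizontal.2.2) = pvDiffWitnessOut_search_horizontal.1 ∧ search_horizontal_alt (pvDiffWitness_search_horizontal.1) (pvDiffWitness_search_horizontal.2.1)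 (pvDiffWitness_search_horizontal.2.2) = pvDiffWitnessOut_search_horizontal.2 ∧ pvDiffWitnessOut_search_horizontal.1 ≠ pvDiffWitnessOut_search_horizontal.2
def Claim_exact_search_horizontal : Prop := ∀ (wordsearch : List (List String)) (x_col_i : Int) (x_row_i : Int), Dom_search_horizontal wordsearch x_col_i x_row_i → Pre_search_horizontal wordsearch x_col_i x_row_i → D_search_horizontal wordsearch x_col_i x_row_i → search_horizontal wordsearch x_col_i x_row_i ≠ search_horizontal_alt wordsearch x_col_i x_row_i

-- ===== LEMMAS AND PROOFS =====

-- conjunction-of-conditions view of A's loop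
abbrev pvBc (row : List String) (x i : Int) : Prop :=
  0 ≤ x - i ∧ PySem.List.pyGet? row (x - i) = PySem.List.pyGet? pvXMAS i
abbrev pvFc (row : List String) (x i : Int) : Prop :=
  x + i < (row.length : Int) ∧ PySem.List.pyGet? row (x + i) = PySem.List.pyGet? pvXMAS i

-- the D_ region, phrased on the row itself
def pvDrow (row : List String) (x : Int) : Prop :=
  (x = -2 ∨ x = -3) ∧ PySem.List.pyGet? row (x + 1) = some "M" ∧
  PySem.List.pyGet? row (x + 2) = some "A" ∧ PySem.List.pyGet? row (x + 3) = some "S"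

lemma pv_flag_step (b : Bool) (p q P : Prop) [Decidable p] [Decidable q] [Decidable P]
    (u v : Option String) (hpq : p ↔ ¬ q) (hP : P ↔ (q ∧ u = v)) :
    (if p ∨ (b = true ∧ u ≠ v) then false else b) = (b && decide P) := by
  cases b <;> by_cases hq : q <;> by_cases huv : u = v <;> simp [hpq, hq, huv, hP]

lemma pv_hb (row : List String) (x i : Int) (b : Bool) :
    (if x - i < 0 ∨ (b = true ∧ PySem.List.pyGet? row (x - i) ≠ PySem.List.pyGet? pvXMAS i) then false else b)
      = (b && decide (pvBc row x i)) := by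
  rw [pv_flag_step b _ (0 ≤ x - i) (pvBc row x i) _ _ (by omega) (by unfold pvBc; exact Iff.rfl)]

lemma pv_hf (row : List String) (x i : Int) (f : Bool) :
    (if x + i ≥ (row.length : Int) ∨ (f = true ∧ PySem.List.pyGet? row (x + i) ≠ PySem.List.pyGet? pvXMAS i) then false else f)
      = (f && decide (pvFc row x i)) := by
  rw [pv_flag_step f _ (x + i < (row.length : Int)) (pvFc row x i) _ _ (by omega) (by unfold pvFc; exact Iff.rfl)]

-- A's loop is the sum of two all-offsets conditions
lemma pv_loop_gen (row : List String) (x : Int) (is : List Int) (b f : Bool) :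
    pvShLoop row x is b f =
      (if b = true ∧ ∀ i ∈ is, pvBc row x i then (1:Int) else 0) +
      (if f = true ∧ ∀ i ∈ is, pvFc row x i then (1:Int) else 0) := by
  induction is generalizing b f with
  | nil => simp [pvShLoop]
  | cons i rest ih =>
    show (if _ then (0:Int) else pvShLoop row x rest _ _) = _
    rw [pv_hb, pv_hf]
    have e1 : ((b && decide (pvBc row x i)) = true ∧ ∀ j ∈ rest, pvBc row x j)
        ↔ (b = true ∧ ∀ j ∈ i :: rest, pvBc row x j) := by
      rw [Bool.and_eq_true, decide_eq_true_eq, List.forall_mem_cons]; tauto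
    have e2 : ((f && decide (pvFc row x i)) = true ∧ ∀ j ∈ rest, pvFc row x j)
        ↔ (f = true ∧ ∀ j ∈ i :: rest, pvFc row x j) := by
      rw [Bool.and_eq_true, decide_eq_true_eq, List.forall_mem_cons]; tauto
    by_cases h0 : (b && decide (pvBc row x i)) = false ∧ (f && decide (pvFc row x i)) = false
    · rw [if_pos h0,
        if_neg (fun hc => by have := (e1.mpr hc).1; rw [h0.1] at this; exact Bool.noConfusion this),
        if_neg (fun hc => by have := (e2.mpr hc).1; rw [h0.2] at this; exact Bool.noConfusion this)]
      norm_num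
    · rw [if_neg h0, ih, if_congr e1 rfl rfl, if_congr e2 rfl rfl]

lemma pv_take3_eq {α : Type} (l : List α) (a b c : α) :
    l.take 3 = [a, b, c] ↔ l[0]? = some a ∧ l[1]? = some b ∧ l[2]? = some c := by
  rcases l with _ | ⟨x0, _ | ⟨x1, _ | ⟨x2, rest⟩⟩⟩ <;> simp

lemma pv_pyGet?_neg {α : Type} (l : List α) (i : Int) (h : i < 0) (h2 : -(l.length : Int) ≤ i) :
    PySem.List.pyGet? l i = l[(l.length + i).toNat]? := by
  unfold PySem.List.pyGet? PySem.List.pyIdx?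
  rw [if_neg (by omega), if_pos (by omega)]
  simp only [Option.bind_some]
  congr 1
  omega

lemma pv_inRange {α : Type} (l : List α) (x : Int) (v : α) (h : PySem.List.pyGet? l x = some v) :
    -(l.length : Int) ≤ x ∧ x < (l.length : Int) := by
  unfold PySem.List.pyGet? PySem.List.pyIdx? at h
  by_cases h0 : 0 ≤ x
  · rw [if_pos h0] at h
    by_cases h1 : x < (l.length : Int)
    · omega
    · rw [if_neg h1] at h; simp at h
  · rw [if_neg h0] at h
    by_cases h1 : -(l.length : Int) ≤ x
    · omega
    · rw [if_neg h1] at h; simp at h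

lemma pv_clampIdx_nonneg (n : Nat) (a : Int) (h0 : 0 ≤ a) (h1 : a ≤ n) :
    PySem.List.clampIdx n a = a.toNat := by
  unfold PySem.List.clampIdx
  rw [if_neg (by omega)]
  omega

lemma pv_clampIdx_neg (n : Nat) (a : Int) (h0 : a < 0) (h1 : 0 ≤ (n : Int) + a) :
    PySem.List.clampIdx n a = ((n : Int) + a).toNat := by
  unfold PySem.List.clampIdx
  rw [if_pos h0, if_neg (by omega)]

lemma pvXMAS1 : PySem.List.pyGet? pvXMAS 1 = some "M" := by decide
lemma pvXMAS2 : PySem.List.pyGet? pvXMAS 2 = some "A" := by decide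
lemma pvXMAS3 : PySem.List.pyGet? pvXMAS 3 = some "S" := by decide

-- A's backward condition is B's guarded backward slice comparison
lemma pv_backward_iff (row : List String) (x : Int) :
    (pvBc row x 1 ∧ pvBc row x 2 ∧ pvBc row x 3)
    ↔ (3 ≤ x ∧ PySem.List.slice row (some (x - 3)) (some x) = ["S", "A", "M"]) := by
  unfold pvBc
  rw [pvXMAS1, pvXMAS2, pvXMAS3]
  by_cases hx : 3 ≤ x
  · simp only [hx, true_and]
    rw [PySem.List.slice_toNat _ (by omega) (by omega)]
    have h3 : x.toNat - (x - 3).toNat = 3 := by omega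
    rw [h3, pv_take3_eq]
    rw [List.getElem?_drop, List.getElem?_drop, List.getElem?_drop]
    rw [PySem.List.pyGet?_of_nonneg (h := by omega), PySem.List.pyGet?_of_nonneg (h := by omega),
        PySem.List.pyGet?_of_nonneg (h := by omega)]
    have e1 : (x - 3).toNat + 0 = (x - 3).toNat := by omega
    have e2 : (x - 3).toNat + 1 = (x - 2).toNat := by omega
    have e3 : (x - 3).toNat + 2 = (x - 1).toNat := by omega
    rw [e1, e2, e3]
    constructor
    · rintro ⟨⟨-, h1⟩, ⟨-, h2⟩, ⟨-, h3⟩⟩; exact ⟨h3, h2, h1⟩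
    · rintro ⟨h1, h2, h3⟩
      exact ⟨⟨by omega, h3⟩, ⟨by omega, h2⟩, ⟨by omega, h1⟩⟩
  · constructor
    · rintro ⟨-, -, ⟨hb, -⟩⟩; omega
    · rintro ⟨hb, -⟩; omega

-- A's forward condition is B's forward slice comparison — outside D_
lemma pv_forward_iff (row : List String) (x : Int)
    (hin : -(row.length : Int) ≤ x ∧ x < (row.length : Int))
    (hnd : ¬ pvDrow row x) :
    (pvFc row x 1 ∧ pvFc row x 2 ∧ pvFc row x 3)
    ↔ (row.drop (PySem.List.clampIdx row.length (x + 1))).take 3 = ["M", "A", "S"] := by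
  unfold pvFc
  rw [pvXMAS1, pvXMAS2, pvXMAS3]
  rw [pv_take3_eq, List.getElem?_drop, List.getElem?_drop, List.getElem?_drop]
  by_cases hx0 : 0 ≤ x
  · -- x ≥ 0: the slice starts at x + 1
    rw [pv_clampIdx_nonneg _ _ (by omega) (by omega)]
    rw [PySem.List.pyGet?_of_nonneg (h := by omega), PySem.List.pyGet?_of_nonneg (h := by omega),
        PySem.List.pyGet?_of_nonneg (h := by omega)]
    have e1 : (x + 1).toNat + 0 = (x + 1).toNat := by omega
    have e2 : (x + 1).toNat + 1 = (x + 2).toNat := by omega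
    have e3 : (x + 1).toNat + 2 = (x + 3).toNat := by omega
    rw [e1, e2, e3]
    constructor
    · rintro ⟨⟨-, h1⟩, ⟨-, h2⟩, ⟨-, h3⟩⟩; exact ⟨h1, h2, h3⟩
    · rintro ⟨h1, h2, h3⟩
      have b1 := (List.getElem?_eq_some_iff.mp h1).1
      have b2 := (List.getElem?_eq_some_iff.mp h2).1
      have b3 := (List.getElem?_eq_some_iff.mp h3).1
      exact ⟨⟨by omega, h1⟩, ⟨by omega, h2⟩, ⟨by omega, h3⟩⟩
  · by_cases hx1 : x = -1
    · subst hx1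
      norm_num
      rw [PySem.List.pyGet?_of_nonneg (h := by omega), PySem.List.pyGet?_of_nonneg (h := by omega),
          PySem.List.pyGet?_of_nonneg (h := by omega)]
      norm_num
      constructor
      · rintro ⟨⟨-, h1⟩, ⟨-, h2⟩, ⟨-, h3⟩⟩; exact ⟨h1, h2, h3⟩
      · rintro ⟨h1, h2, h3⟩
        have b1 := (List.getElem?_eq_some_iff.mp h1).1
        have b2 := (List.getElem?_eq_some_iff.mp h2).1
        have b3 := (List.getElem?_eq_some_iff.mp h3).1
        exact ⟨⟨by omega, h1⟩, ⟨by omega, h2⟩, ⟨by omega, h3⟩⟩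
    · -- x ≤ -2
      rw [pv_clampIdx_neg _ _ (by omega) (by omega)]
      by_cases hx4 : x ≤ -4
      · -- fully wrapped: all three reads stay below the end of the row
        rw [pv_pyGet?_neg _ _ (by omega) (by omega), pv_pyGet?_neg _ _ (by omega) (by omega),
            pv_pyGet?_neg _ _ (by omega) (by omega)]
        have e1 : ((row.length : Int) + (x + 1)).toNat + 0 = ((row.length : Int) + (x + 1)).toNat := by omega
        have e2 : ((row.length : Int) + (x + 1)).toNat + 1 = ((row.length : Int) + (x + 2)).toNat := by omega
        have e3 : ((row.length : Int) + (x + 1)).toNat + 2 = ((row.length : Int) + (x + 3)).toNat := by omega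
        rw [e1, e2, e3]
        constructor
        · rintro ⟨⟨-, h1⟩, ⟨-, h2⟩, ⟨-, h3⟩⟩; exact ⟨h1, h2, h3⟩
        · rintro ⟨h1, h2, h3⟩
          exact ⟨⟨by omega, h1⟩, ⟨by omega, h2⟩, ⟨by omega, h3⟩⟩
      · -- x = -2 or x = -3: B's slice runs past the end of the row and is short, so the
        -- right-hand side is false; the left-hand side holding is exactly the region D_
        have hx23 : x = -2 ∨ x = -3 := by omega
        constructor
        · rintro ⟨⟨-, h1⟩, ⟨-, h2⟩, ⟨-, h3⟩⟩
          exact absurd ⟨hx23, h1, h2, h3⟩ hnd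
        · rintro ⟨h1, h2, h3⟩
          exfalso
          rcases hx23 with hx | hx <;> subst hx
          · have := (List.getElem?_eq_some_iff.mp h2).1
            omega
          · have := (List.getElem?_eq_some_iff.mp h3).1
            omega

-- evaluation of the two ports once the row and the assert are fixed
lemma pv_A_eq (ws : List (List String)) (c x : Int) (row : List String)
    (hrow : PySem.List.pyGet? ws c = some row) (hX : PySem.List.pyGet? row x = some "X") :
    search_horizontal ws c x =
      (if pvBc row x 1 ∧ pvBc row x 2 ∧ pvBc row x 3 then (1:Int) else 0) +
      (if pvFc row x 1 ∧ pvFc row x 2 ∧ pvFc row x 3 then (1:Int) else 0) := by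
  unfold search_horizontal
  rw [hrow]
  simp only [if_pos hX]
  rw [show PySem.List.pyRange 1 4 1 = [1, 2, 3] from by decide, pv_loop_gen]
  simp

lemma pv_B_eq (ws : List (List String)) (c x : Int) (row : List String)
    (hrow : PySem.List.pyGet? ws c = some row) (hX : PySem.List.pyGet? row x = some "X") :
    search_horizontal_alt ws c x =
      (if 3 ≤ x ∧ PySem.List.slice row (some (x - 3)) (some x) = ["S", "A", "M"] then (1:Int) else 0) +
      (if (row.drop (PySem.List.clampIdx row.length (x + 1))).take 3 = ["M", "A", "S"] then (1:Int) else 0) := by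
  unfold search_horizontal_alt
  rw [hrow]
  simp only [if_pos hX]
  rw [PySem.List.slice_some_none, PySem.List.slice_to _ (by norm_num)]
  norm_num
  rfl

lemma pv_cell_row (ws : List (List String)) (c j : Int) (row : List String)
    (hrow : PySem.List.pyGet? ws c = some row) :
    pvCell ws c j = PySem.List.pyGet? row j := by
  unfold pvCell
  rw [hrow]
  rfl

lemma pv_D_iff (ws : List (List String)) (c x : Int) (row : List String)
    (hrow : PySem.List.pyGet? ws c = some row) :
    D_search_horizontal ws c x ↔ pvDrow row x := by
  unfold D_search_horizontal pvDrow
  rw [List.map_cons, List.map_cons, List.map_cons, List.map_nil,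
      pv_cell_row _ _ _ _ hrow, pv_cell_row _ _ _ _ hrow, pv_cell_row _ _ _ _ hrow]
  simp

-- ===== VERDICT (by name: the statement is the Claim_ definition above) =====
theorem search_horizontal_spec : Claim_unchanged_search_horizontal := by
  intro ws c x hDom hPre hND
  unfold Pre_search_horizontal at hPre
  cases hrow : PySem.List.pyGet? ws c with
  | none =>
    unfold pvCell at hPre
    rw [hrow] at hPre
    simp at hPre
  | some row =>
    rw [pv_cell_row _ _ _ _ hrow] at hPre
    show search_horizontal ws c x = search_horizontal_alt ws c x
    rw [pv_A_eq _ _ _ _ hrow hPre, pv_B_eq _ _ _ _ hrow hPre]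
    have hnd : ¬ pvDrow row x := fun hd => hND ((pv_D_iff _ _ _ _ hrow).mpr hd)
    congr 1
    · exact if_congr (pv_backward_iff row x) rfl rfl
    · exact if_congr (pv_forward_iff row x (pv_inRange _ _ _ hPre) hnd) rfl rfl

theorem search_horizontal_changed : Claim_changed_search_horizontal := by
  unfold Claim_changed_search_horizontal; decide

theorem search_horizontal_tight : Claim_exact_search_horizontal := by
  intro ws c x hDom hPre hD
  unfold Pre_search_horizontal at hPre
  cases hrow : PySem.List.pyGet? ws c with
  | none =>
    unfold pvCell at hPre
    rw [hrow] at hPre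
    simp at hPre
  | some row =>
    rw [pv_cell_row _ _ _ _ hrow] at hPre
    rw [pv_A_eq _ _ _ _ hrow hPre, pv_B_eq _ _ _ _ hrow hPre]
    obtain ⟨hx23, h1, h2, h3⟩ := (pv_D_iff _ _ _ _ hrow).mp hD
    have hin := pv_inRange _ _ _ hPre
    have hxle : x ≤ -2 := by omega
    have hb3 : x + 3 < (row.length : Int) := by
      have h3' := h3
      rw [PySem.List.pyGet?_of_nonneg (h := by omega)] at h3'
      have := (List.getElem?_eq_some_iff.mp h3').1
      omega
    -- A's backward and B's backward conditions are both false (x < 3)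
    have hAb : ¬ (pvBc row x 1 ∧ pvBc row x 2 ∧ pvBc row x 3) := by
      rintro ⟨⟨hb, -⟩, -⟩; omega
    have hBb : ¬ (3 ≤ x ∧ PySem.List.slice row (some (x - 3)) (some x) = ["S", "A", "M"]) := by
      rintro ⟨hb, -⟩; omega
    -- B's forward slice is short on D_, hence false
    have hBf : ¬ ((row.drop (PySem.List.clampIdx row.length (x + 1))).take 3 = ["M", "A", "S"]) := by
      rw [pv_clampIdx_neg _ _ (by omega) (by omega), pv_take3_eq,
          List.getElem?_drop, List.getElem?_drop, List.getElem?_drop]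
      rintro ⟨h1, h2, h3⟩
      rcases hx23 with hx | hx <;> subst hx
      · have := (List.getElem?_eq_some_iff.mp h2).1
        omega
      · have := (List.getElem?_eq_some_iff.mp h3).1
        omega
    -- A's forward condition holds on D_
    have hAf : pvFc row x 1 ∧ pvFc row x 2 ∧ pvFc row x 3 := by
      unfold pvFc
      rw [pvXMAS1, pvXMAS2, pvXMAS3]
      exact ⟨⟨by omega, h1⟩, ⟨by omega, h2⟩, ⟨by omega, h3⟩⟩
    rw [if_neg hAb, if_neg hBb, if_neg hBf, if_pos hAf]
    norm_num
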